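-- pv_equiv track=rewrite | github.com/drdubel/cwiczenia | logia/Nasłuch_II.py | nasluch_II
-- ===== SOURCE A (Python) =====
-- def nasluch_II(slowa):
--     wynik = 0
--     i = 0
--     for lit_0, lit_1 in zip(slowa[0], slowa[1]):
--         if lit_0 == lit_1:
--             wynik += 10
--             slowa[0] = slowa[0][:i] + slowa[0][i+1:]
--             slowa[1] = slowa[1][:i] + slowa[1][i+1:]
--             i -= 1
--         i += 1
--     dlugosci = {
--         len(slowa[0]): slowa[0],
--         len(slowa[1]): slowa[1]
--     }
--     krotsze = slowa.index(dlugosci[min(len(slowa[0]), len(slowa[1]))])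
--     for lit_0, lit_1 in zip(slowa[0], slowa[1]):
--         if krotsze == 0:
--             if lit_0 in slowa[1]:
--                 wynik += 1
--         else:
--             if lit_1 in slowa[0]:
--                 wynik += 1
--     return wynik
-- ===== SOURCE B (Python) =====
-- def nasluch_II(slowa):
--     a, b = slowa[0], slowa[1]
--     n = min(len(a), len(b))
--     matches = sum(x == y for x, y in zip(a, b))
--     ra = ''.join(x for x, y in zip(a, b) if x != y) + a[n:]
--     rb = ''.join(y for x, y in zip(a, b) if x != y) + b[n:]
--     slowa[0], slowa[1] = ra, rb
--     shorter, longer = (ra, rb) if len(ra) < len(rb) or ra == rb else (rb, ra)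
--     return 10 * matches + sum(c in longer for c in shorter)
-- ===== Notes on version B (the rewrite author's own statement) =====
-- stated objective: simpler
-- what changed: Replaces A's in-place string surgery with index bookkeeping, length-keyed dict and list.index trick by one pass over zip(a,b) (count matches, filter out matched positions) plus a direct shorter/longer selection and a membership count; slowa[0]/slowa[1] are still reassigned to the reduced strings.
import Mathlib
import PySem

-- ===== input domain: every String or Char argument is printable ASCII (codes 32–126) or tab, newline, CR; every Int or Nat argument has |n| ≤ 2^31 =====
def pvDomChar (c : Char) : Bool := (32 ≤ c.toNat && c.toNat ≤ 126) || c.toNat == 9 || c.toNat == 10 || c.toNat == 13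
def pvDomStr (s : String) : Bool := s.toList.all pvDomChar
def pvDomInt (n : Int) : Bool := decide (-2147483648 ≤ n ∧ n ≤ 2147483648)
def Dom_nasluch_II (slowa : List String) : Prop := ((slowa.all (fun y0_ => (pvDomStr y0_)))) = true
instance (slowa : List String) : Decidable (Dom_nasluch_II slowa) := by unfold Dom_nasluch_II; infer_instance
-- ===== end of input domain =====

-- B replaces A's in-place string surgery (index bookkeeping, length-keyed dict, list.index)
-- by a single zip pass plus a direct shorter/longer choice (simpler; return value only is
-- proved equal — both Pythons reassign slowa[0]/slowa[1] to the same reduced strings).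

-- ===== PORT A =====
-- one step of A's first loop: state (wynik, i, slowa0, slowa1)
def pvStepA (st : Int × Int × List Char × List Char) (p : Char × Char) :
    Int × Int × List Char × List Char :=
  let w := st.1; let i := st.2.1; let s0 := st.2.2.1; let s1 := st.2.2.2
  if p.1 = p.2 then
    (w + 10, (i - 1) + 1,
      PySem.List.slice s0 none (some i) ++ PySem.List.slice s0 (some (i + 1)) none,
      PySem.List.slice s1 none (some i) ++ PySem.List.slice s1 (some (i + 1)) none)
  else (w, i + 1, s0, s1)

def nasluch_II (slowa : List String) : Int :=
  let a := (slowa.getD 0 "").toList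
  let b := (slowa.getD 1 "").toList
  let r := (a.zip b).foldl pvStepA (0, 0, a, b)
  let w := r.1; let s0 := r.2.2.1; let s1 := r.2.2.2
  let dl : PySem.Dict Int (List Char) :=
    (PySem.Dict.empty.insert (s0.length : Int) s0).insert (s1.length : Int) s1
  let mutated := s0 :: s1 :: (slowa.drop 2).map String.toList
  let krotsze : Int :=
    (((PySem.List.index? mutated (dl.getD (min (s0.length : Int) (s1.length : Int)) [])).getD 0 : Nat) : Int)
  (s0.zip s1).foldl
    (fun w p =>
      if krotsze = 0 then (if p.1 ∈ s1 then w + 1 else w)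
      else (if p.2 ∈ s0 then w + 1 else w)) w

-- ===== PORT B =====
def nasluch_II_alt (slowa : List String) : Int :=
  let a := (slowa.getD 0 "").toList
  let b := (slowa.getD 1 "").toList
  let n := min a.length b.length
  let matchCount : Int := ((a.zip b).map (fun p => if p.1 == p.2 then (1 : Int) else 0)).sum
  let ra := ((a.zip b).filter (fun p => p.1 != p.2)).map Prod.fst ++ PySem.List.slice a (some (n : Int)) none
  let rb := ((a.zip b).filter (fun p => p.1 != p.2)).map Prod.snd ++ PySem.List.slice b (some (n : Int)) none
  let sl := if ra.length < rb.length || ra == rb then (ra, rb) else (rb, ra)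
  10 * matchCount + ((sl.1.map (fun c => if c ∈ sl.2 then (1 : Int) else 0)).sum)

-- ===== PRECONDITION & SPEC =====
-- Pre_ excludes only crashes: Python A (and B) raise IndexError when slowa has fewer than 2 elements.
def Pre_nasluch_II (slowa : List String) : Prop := 2 ≤ slowa.length
instance (slowa : List String) : Decidable (Pre_nasluch_II slowa) := by
  unfold Pre_nasluch_II; infer_instance
def pvWitness_nasluch_II : List String := ["ala", "ola"]

def Spec_nasluch_II (slowa : List String) (out : Int) : Prop := out = nasluch_II_alt slowa
instance (slowa : List String) (out : Int) : Decidable (Spec_nasluch_II slowa out) := by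
  unfold Spec_nasluch_II; infer_instance

-- ===== CLAIM (what is proved, stated in full; the proofs are below) =====
def Claim_equal_nasluch_II : Prop := ∀ (slowa : List String), Dom_nasluch_II slowa →
  Pre_nasluch_II slowa → Spec_nasluch_II slowa (nasluch_II slowa)

-- ===== LEMMAS AND PROOFS =====

-- number of matching positions of the zip
def pvCnt : List Char → List Char → Int
  | x :: xs, y :: ys => (if x = y then 1 else 0) + pvCnt xs ys
  | _, _ => 0

-- number of non-matching positions of the zip
def pvUm : List Char → List Char → Int
  | x :: xs, y :: ys => (if x = y then 0 else 1) + pvUm xs ys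
  | _, _ => 0

-- the left word with matched positions removed (tail beyond the zip kept)
def pvRed : List Char → List Char → List Char
  | x :: xs, y :: ys => if x = y then pvRed xs ys else x :: pvRed xs ys
  | xs, _ => xs

lemma pvLoop1 (t0 t1 : List Char) : ∀ (pre0 pre1 : List Char) (w : Int),
    pre0.length = pre1.length →
    (t0.zip t1).foldl pvStepA (w, (pre0.length : Int), pre0 ++ t0, pre1 ++ t1)
      = (w + 10 * pvCnt t0 t1, (pre0.length : Int) + pvUm t0 t1,
         pre0 ++ pvRed t0 t1, pre1 ++ pvRed t1 t0) := by
  induction t0 generalizing t1 with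
  | nil => intro pre0 pre1 w h; simp [pvCnt, pvUm, pvRed]
  | cons x xs ih =>
    intro pre0 pre1 w h
    cases t1 with
    | nil => simp [pvCnt, pvUm, pvRed]
    | cons y ys =>
      have hdrop : ∀ (z : Char) (l r : List Char), (l ++ z :: r).drop (l.length + 1) = r := by
        intro z l r
        rw [← List.drop_drop, List.drop_left]
        simp
      simp only [List.zip_cons_cons, List.foldl_cons]
      by_cases hxy : x = y
      · have e0 : pvStepA (w, (pre0.length : Int), pre0 ++ x :: xs, pre1 ++ y :: ys) (x, y)
            = (w + 10, (pre0.length : Int), pre0 ++ xs, pre1 ++ ys) := by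
          simp only [pvStepA, hxy, if_pos]
          have c0 : ((pre0.length : Int) + 1) = ((pre0.length + 1 : Nat) : Int) := by
            push_cast; ring
          rw [c0, PySem.List.slice_to_natCast, PySem.List.slice_to_natCast,
              PySem.List.slice_from_natCast, PySem.List.slice_from_natCast]
          simp only [Prod.mk.injEq]
          and_intros
          all_goals first
            | trivial | omega | rw [List.take_left, hdrop] | rw [h, List.take_left, hdrop]
        rw [e0, ih ys pre0 pre1 (w + 10) h]
        have r1 : pvCnt (x :: xs) (y :: ys) = 1 + pvCnt xs ys := by simp [pvCnt, hxy]
        have r2 : pvUm (x :: xs) (y :: ys) = pvUm xs ys := by simp [pvUm, hxy]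
        have r3 : pvRed (x :: xs) (y :: ys) = pvRed xs ys := by simp [pvRed, hxy]
        have r4 : pvRed (y :: ys) (x :: xs) = pvRed ys xs := by simp [pvRed, hxy]
        simp only [Prod.mk.injEq, r1, r2, r3, r4]
        and_intros
        all_goals first | trivial | ring
      · have e0 : pvStepA (w, (pre0.length : Int), pre0 ++ x :: xs, pre1 ++ y :: ys) (x, y)
            = (w, (pre0.length : Int) + 1, pre0 ++ x :: xs, pre1 ++ y :: ys) := by
          simp [pvStepA, hxy]
        rw [e0]
        have r0 : pre0 ++ x :: xs = (pre0 ++ [x]) ++ xs := by simp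
        have r1 : pre1 ++ y :: ys = (pre1 ++ [y]) ++ ys := by simp
        have c0 : ((pre0.length : Int) + 1) = (((pre0 ++ [x]).length : Nat) : Int) := by
          simp
        rw [r0, r1, c0, ih ys (pre0 ++ [x]) (pre1 ++ [y]) w (by simp [h])]
        have hyx : ¬ (y = x) := fun hh => hxy hh.symm
        have s1 : pvCnt (x :: xs) (y :: ys) = pvCnt xs ys := by simp [pvCnt, hxy]
        have s2 : pvUm (x :: xs) (y :: ys) = 1 + pvUm xs ys := by simp [pvUm, hxy]
        have s3 : pvRed (x :: xs) (y :: ys) = x :: pvRed xs ys := by simp [pvRed, hxy]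
        have s4 : pvRed (y :: ys) (x :: xs) = y :: pvRed ys xs := by simp [pvRed, hyx]
        simp only [Prod.mk.injEq, s1, s2, s3, s4]
        and_intros
        all_goals first | trivial | (simp; ring) | simp

lemma pvRed_eq_filter (a b : List Char) :
    pvRed a b = ((a.zip b).filter (fun p => p.1 != p.2)).map Prod.fst
      ++ a.drop (min a.length b.length) := by
  induction a generalizing b with
  | nil => simp [pvRed]
  | cons x xs ih =>
    cases b with
    | nil => simp [pvRed]
    | cons y ys =>
      simp only [pvRed, List.zip_cons_cons, List.filter_cons]
      by_cases h : x = y <;> by_cases hl : xs.length ≤ ys.length <;>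
        simp [h, hl, ih ys, List.drop_succ_cons]

lemma pvRed_eq_filter' (a b : List Char) :
    pvRed b a = ((a.zip b).filter (fun p => p.1 != p.2)).map Prod.snd
      ++ b.drop (min a.length b.length) := by
  induction a generalizing b with
  | nil => simp [pvRed]
  | cons x xs ih =>
    cases b with
    | nil => simp [pvRed]
    | cons y ys =>
      simp only [pvRed, List.zip_cons_cons, List.filter_cons]
      by_cases h : x = y <;> by_cases hl : xs.length ≤ ys.length
      · simp [h, hl, ih ys, List.drop_succ_cons]
      · simp [h, hl, ih ys, List.drop_succ_cons]
      · simp [h, Ne.symm h, hl, ih ys, List.drop_succ_cons]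
      · simp [h, Ne.symm h, hl, ih ys, List.drop_succ_cons]

lemma pvCnt_eq_sum (a b : List Char) :
    ((a.zip b).map (fun p => if p.1 == p.2 then (1 : Int) else 0)).sum = pvCnt a b := by
  induction a generalizing b with
  | nil => simp [pvCnt]
  | cons x xs ih =>
    cases b with
    | nil => simp [pvCnt]
    | cons y ys =>
      simp only [List.zip_cons_cons, List.map_cons, List.sum_cons, ih ys, pvCnt]
      by_cases h : x = y <;> simp [h]

lemma pvFoldl_count {α : Type} (P : α → Prop) [DecidablePred P] (l : List α) : ∀ (w : Int),
    l.foldl (fun w x => if P x then w + 1 else w) w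
      = w + (l.map (fun x => if P x then (1 : Int) else 0)).sum := by
  induction l with
  | nil => simp
  | cons x xs ih =>
    intro w
    by_cases h : P x <;> simp [h, ih] <;> ring

-- A's dict + list.index "shorter" selection agrees with B's direct choice
lemma pvPhase2 (ra rb : List Char) (rest : List (List Char)) (w : Int) :
    (ra.zip rb).foldl
      (fun w p =>
        if ((((PySem.List.index? (ra :: rb :: rest)
              (((PySem.Dict.empty.insert (ra.length : Int) ra).insert (rb.length : Int) rb).getD
                (min (ra.length : Int) (rb.length : Int)) [])).getD 0 : Nat) : Int) = 0)
        then (if p.1 ∈ rb then w + 1 else w)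
        else (if p.2 ∈ ra then w + 1 else w)) w
      = w + (((if ra.length < rb.length || ra == rb then (ra, rb) else (rb, ra)).1.map
          (fun c => if c ∈ (if ra.length < rb.length || ra == rb then (ra, rb) else (rb, ra)).2
                    then (1 : Int) else 0)).sum) := by
  have mfst : ∀ (h : ra.length ≤ rb.length),
      (ra.zip rb).map (fun p => if p.1 ∈ rb then (1 : Int) else 0)
        = ra.map (fun c => if c ∈ rb then (1 : Int) else 0) := by
    intro h
    rw [show (fun p : Char × Char => if p.1 ∈ rb then (1 : Int) else 0)
        = ((fun c => if c ∈ rb then (1 : Int) else 0) ∘ Prod.fst) from rfl,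
      ← List.map_map, List.map_fst_zip h]
  have msnd : ∀ (h : rb.length ≤ ra.length),
      (ra.zip rb).map (fun p => if p.2 ∈ ra then (1 : Int) else 0)
        = rb.map (fun c => if c ∈ ra then (1 : Int) else 0) := by
    intro h
    rw [show (fun p : Char × Char => if p.2 ∈ ra then (1 : Int) else 0)
        = ((fun c => if c ∈ ra then (1 : Int) else 0) ∘ Prod.snd) from rfl,
      ← List.map_map, List.map_snd_zip h]
  rcases lt_trichotomy ra.length rb.length with hlt | heq | hgt
  · have hmin : min (ra.length : Int) (rb.length : Int) = (ra.length : Int) :=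
      min_eq_left (by exact_mod_cast hlt.le)
    have hval : (((PySem.Dict.empty.insert (ra.length : Int) ra).insert (rb.length : Int) rb).getD
        (min (ra.length : Int) (rb.length : Int)) []) = ra := by
      rw [PySem.Dict.getD_insert, PySem.Dict.getD_insert, PySem.Dict.getD_empty, hmin,
        if_neg (by exact_mod_cast hlt.ne), if_pos rfl]
    simp only [hval, PySem.List.index?_cons_self, Option.getD_some, Nat.cast_zero]
    simp only [if_true]
    rw [pvFoldl_count (fun p : Char × Char => p.1 ∈ rb) (ra.zip rb) w, mfst hlt.le]
    simp [hlt]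
  · have hmin : min (ra.length : Int) (rb.length : Int) = (rb.length : Int) := by
      rw [heq]; exact min_self _
    have hval : (((PySem.Dict.empty.insert (ra.length : Int) ra).insert (rb.length : Int) rb).getD
        (min (ra.length : Int) (rb.length : Int)) []) = rb := by
      rw [PySem.Dict.getD_insert, PySem.Dict.getD_insert, PySem.Dict.getD_empty, hmin, if_pos rfl]
    by_cases hab : ra = rb
    · subst hab
      simp only [hval, PySem.List.index?_cons_self, Option.getD_some, Nat.cast_zero]
      simp only [if_true]
      rw [pvFoldl_count (fun p : Char × Char => p.1 ∈ ra) (ra.zip ra) w, mfst le_rfl]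
      simp
    · have hidx : PySem.List.index? (ra :: rb :: rest) rb = some 1 := by
        rw [PySem.List.index?_cons_of_ne _ hab, PySem.List.index?_cons_self]
        rfl
      simp only [hval, hidx, Option.getD_some, Nat.cast_one]
      have hz : ∀ p : Char × Char, ∀ v : Int,
          (if (1 : Int) = 0 then (if p.1 ∈ rb then v + 1 else v) else (if p.2 ∈ ra then v + 1 else v))
            = (if p.2 ∈ ra then v + 1 else v) := by intro p v; simp
      try simp only [hz]
      rw [pvFoldl_count (fun p : Char × Char => p.2 ∈ ra) (ra.zip rb) w, msnd heq.ge]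
      simp [heq, hab]
  · have hmin : min (ra.length : Int) (rb.length : Int) = (rb.length : Int) :=
      min_eq_right (by exact_mod_cast hgt.le)
    have hval : (((PySem.Dict.empty.insert (ra.length : Int) ra).insert (rb.length : Int) rb).getD
        (min (ra.length : Int) (rb.length : Int)) []) = rb := by
      rw [PySem.Dict.getD_insert, PySem.Dict.getD_insert, PySem.Dict.getD_empty, hmin, if_pos rfl]
    have hab : ¬ (ra = rb) := fun hh => hgt.ne (by rw [hh])
    have hidx : PySem.List.index? (ra :: rb :: rest) rb = some 1 := by
      rw [PySem.List.index?_cons_of_ne _ hab, PySem.List.index?_cons_self]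
      rfl
    simp only [hval, hidx, Option.getD_some, Nat.cast_one]
    have hz : ∀ p : Char × Char, ∀ v : Int,
        (if (1 : Int) = 0 then (if p.1 ∈ rb then v + 1 else v) else (if p.2 ∈ ra then v + 1 else v))
          = (if p.2 ∈ ra then v + 1 else v) := by intro p v; simp
    try simp only [hz]
    rw [pvFoldl_count (fun p : Char × Char => p.2 ∈ ra) (ra.zip rb) w, msnd hgt.le]
    have hnlt : ¬ (ra.length < rb.length) := by omega
    simp [hnlt, hab]

-- ===== VERDICT (by name: the statement is the Claim_ definition above) =====
theorem nasluch_II_spec : Claim_equal_nasluch_II := by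
  intro slowa _ _
  unfold Spec_nasluch_II
  simp only [nasluch_II, nasluch_II_alt]
  have L1 : ∀ (a b : List Char), (a.zip b).foldl pvStepA (0, 0, a, b)
      = (10 * pvCnt a b, pvUm a b, pvRed a b, pvRed b a) := by
    intro a b
    have h := pvLoop1 a b [] [] 0 rfl
    simpa using h
  simp only [L1]
  simp only [PySem.List.slice_from_natCast]
  rw [pvCnt_eq_sum, ← pvRed_eq_filter, ← pvRed_eq_filter']
  rw [pvPhase2]
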